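-- pv_equiv track=rewrite | github.com/maneshd/advent-of-code | 2020/19/day19.py | is_string_good
-- ===== SOURCE A (Python) =====
-- def is_string_good(A, B, s):
--     ss = split_string(s)
--
--     if ss[-1] not in B:
--         return False
--
--     if ss[0] not in A or ss[1] not in A:
--         return False
--
--     ss = ss[2: -1]
--
--     if not ss:
--         return True
--
--
--     inA = [x in A for x in ss]
--     inB = [x in B for x in ss]
--
--     if False not in inA:
--         return True
--
--     aCount = inA.index(False)
--     if not all(inB[aCount:]):
--         return False
--
--     bCount = len(inA) - aCount
--     return aCount >= bCount
--
-- def split_string(s):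
--     result = []
--     for i in range(0, len(s), 8):
--         result.append(s[i:i+8])
--     return result
-- ===== SOURCE B (Python) =====
-- def is_string_good(A, B, s):
--     ss = split_string(s)
--     if len(ss) < 2:
--         return False
--     if ss[-1] not in B or ss[0] not in A or ss[1] not in A:
--         return False
--     mid = ss[2:-1]
--     n = len(mid)
--     # t = length of the maximal suffix of mid lying wholly in B (backward scan)
--     t = 0
--     for x in reversed(mid):
--         if x not in B:
--             break
--         t += 1
--     # the answer is exactly: the first max(ceil(n/2), n - t) chunks all lie in A
--     need = max((n + 1) // 2, n - t)
--     return all(x in A for x in mid[:need])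
--
-- def split_string(s):
--     result = []
--     for i in range(0, len(s), 8):
--         result.append(s[i:i+8])
--     return result
-- ===== Notes on version B (the rewrite author's own statement) =====
-- stated objective: alternative
-- what changed: A splits the middle at the first chunk not in A (boolean lists, index(False), all over a slice) and compares prefix vs suffix counts; B never computes that split point: it scans the middle backwards to measure the maximal suffix t lying in B, derives the closed-form threshold need = max(ceil(n/2), n-t), and answers with a single check that the first need chunks all lie in A.
-- outside the precondition, e.g. on is_string_good(set(), set(), ''): A raises IndexError, B returns False; on is_string_good({'x'}, {'x'}, 'x'): A raises IndexError, B returns False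
import Mathlib
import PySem

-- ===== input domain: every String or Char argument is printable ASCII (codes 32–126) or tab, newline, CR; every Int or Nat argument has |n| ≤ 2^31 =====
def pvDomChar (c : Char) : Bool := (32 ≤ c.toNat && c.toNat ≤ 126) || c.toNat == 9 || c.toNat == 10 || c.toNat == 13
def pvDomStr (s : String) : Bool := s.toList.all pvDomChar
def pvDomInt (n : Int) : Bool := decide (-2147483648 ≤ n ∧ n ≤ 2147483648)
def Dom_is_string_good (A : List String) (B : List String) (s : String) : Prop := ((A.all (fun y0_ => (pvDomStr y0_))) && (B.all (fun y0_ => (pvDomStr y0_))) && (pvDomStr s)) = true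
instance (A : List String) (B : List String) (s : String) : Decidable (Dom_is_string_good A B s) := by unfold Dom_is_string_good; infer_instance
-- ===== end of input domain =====

-- ===== PORT A =====
-- B drops A's first-non-A split point entirely: it measures the maximal B-suffix backwards and
-- checks one closed-form A-prefix; objective: alternative. (Where A raises IndexError, B returns
-- False; those inputs are outside Pre_.)
def split_string (s : String) : List String :=
  (PySem.List.pyRange 0 (PySem.Str.len s) 8).foldl
    (fun result i => result ++ [PySem.Str.slice s (some i) (some (i + 8))]) []

def is_string_good (A : List String) (B : List String) (s : String) : Bool :=
  let ss := split_string s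
  match PySem.List.pyGet? ss (-1) with
  | none => false        -- ss[-1]: IndexError on the empty string, excluded by Pre_
  | some last =>
    if ¬ (last ∈ B) then false
    else
      match PySem.List.pyGet? ss 0 with
      | none => false    -- unreachable (ss[-1] succeeded)
      | some c0 =>
        if ¬ (c0 ∈ A) then false
        else
          match PySem.List.pyGet? ss 1 with
          | none => false  -- ss[1]: IndexError on a 1-chunk string, excluded by Pre_
          | some c1 =>
            if ¬ (c1 ∈ A) then false
            else
              let ss2 := PySem.List.slice ss (some 2) (some (-1))
              if ss2.isEmpty then true
              else
                let inA := ss2.map (fun x => decide (x ∈ A))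
                let inB := ss2.map (fun x => decide (x ∈ B))
                if ¬ (false ∈ inA) then true
                else
                  match PySem.List.index? inA false with
                  | none => false  -- unreachable: False ∈ inA
                  | some aCount =>
                    if ¬ ((PySem.List.slice inB (some (aCount : Int)) none).all (fun b => b)) then
                      false
                    else decide ((aCount : Int) ≥ (inA.length : Int) - (aCount : Int))

-- ===== PORT B =====
-- `for x in reversed(mid): if x not in B: break; t += 1` — the backward scan, as a recursion
-- over the reversed list
def count_b_suffix (B : List String) : List String → Nat
  | [] => 0
  | x :: xs => if x ∈ B then count_b_suffix B xs + 1 else 0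

def is_string_good_alt (A : List String) (B : List String) (s : String) : Bool :=
  let ss := split_string s
  if ss.length < 2 then false
  else if ¬ (PySem.List.pyGetD ss (-1) "" ∈ B) ∨ ¬ (PySem.List.pyGetD ss 0 "" ∈ A)
          ∨ ¬ (PySem.List.pyGetD ss 1 "" ∈ A) then false
  else
    let mid := PySem.List.slice ss (some 2) (some (-1))
    let n := mid.length
    let t := count_b_suffix B mid.reverse
    let need := max ((n + 1) / 2) (n - t)
    (mid.take need).all (fun x => decide (x ∈ A))

-- ===== PRECONDITION & SPEC =====
-- Pre_ excludes exactly the inputs where A raises IndexError: the empty string (ss[-1] on []),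
-- and strings of at most 8 characters (a single chunk, equal to s) lying in both A and B (ss[1]).
def Pre_is_string_good (A : List String) (B : List String) (s : String) : Prop :=
  s.toList ≠ [] ∧ (9 ≤ s.toList.length ∨ ¬ s ∈ B ∨ ¬ s ∈ A)
instance (A : List String) (B : List String) (s : String) : Decidable (Pre_is_string_good A B s) := by
  unfold Pre_is_string_good; infer_instance
def pvWitness_is_string_good : List String × List String × String := (["aaaaaaaa"], ["bbbbbbbb"], "aaaaaaaabbbbbbbb")

def Spec_is_string_good (A : List String) (B : List String) (s : String) (out : Bool) : Prop := out = is_string_good_alt A B s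
instance (A : List String) (B : List String) (s : String) (out : Bool) : Decidable (Spec_is_string_good A B s out) := by unfold Spec_is_string_good; infer_instance

-- ===== CLAIM (what is proved, stated in full; the proofs are below) =====
def Claim_equal_is_string_good : Prop := ∀ (A : List String) (B : List String) (s : String), Dom_is_string_good A B s → Pre_is_string_good A B s → Spec_is_string_good A B s (is_string_good A B s)

-- ===== LEMMAS AND PROOFS =====

lemma split_string_eq (s : String) :
    split_string s = (List.range ((s.toList.length + 7) / 8)).map
      (fun (k : Nat) => PySem.Str.slice s (some (0 + 8 * (k : Int))) (some (0 + 8 * (k : Int) + 8))) := by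
  unfold split_string
  rw [PySem.List.foldl_append_singleton_eq_map, List.nil_append,
    PySem.List.pyRange_of_pos 0 (PySem.Str.len s) (by norm_num : (0:Int) < 8), List.map_map]
  have hN : (if (0:Int) < PySem.Str.len s then ((PySem.Str.len s - 0 + 8 - 1) / 8).toNat else 0)
      = (s.toList.length + 7) / 8 := by
    rw [PySem.Str.len_eq]
    split_ifs with h <;> omega
  rw [hN]
  simp [Function.comp]

lemma length_split_string (s : String) :
    (split_string s).length = (s.toList.length + 7) / 8 := by
  rw [split_string_eq]; simp

lemma split_string_short (s : String) (h1 : s.toList ≠ []) (h8 : s.toList.length ≤ 8) :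
    split_string s = [s] := by
  rw [split_string_eq]
  have : (s.toList.length + 7) / 8 = 1 := by
    have : 1 ≤ s.toList.length := List.length_pos_of_ne_nil h1
    omega
  rw [this]
  have h0 : (0 : Int) + 8 * ((0 : Nat) : Int) = 0 := by norm_num
  simp only [List.range_one, List.map_cons, List.map_nil, h0]
  norm_num
  simp [PySem.Str.slice, PySem.Chars.slice, PySem.List.slice_to, List.take_of_length_le h8]

lemma count_b_suffix_eq (B : List String) (l : List String) :
    count_b_suffix B l = (l.takeWhile (fun x => decide (x ∈ B))).length := by
  induction l with
  | nil => rfl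
  | cons x xs ih =>
    by_cases hx : x ∈ B
    · simp [count_b_suffix, hx, ih]
    · simp [count_b_suffix, hx]

lemma take_all_iff {α : Type} (p : α → Bool) (l : List α) (k : Nat) :
    (l.take k).all p = true ↔ min k l.length ≤ (l.takeWhile p).length := by
  induction l generalizing k with
  | nil => simp
  | cons x xs ih =>
    cases k with
    | zero => simp
    | succ k =>
      rw [List.take_succ_cons, List.all_cons, List.takeWhile_cons]
      by_cases hx : p x = true
      · rw [if_pos hx, hx]
        simp only [Bool.true_and, List.length_cons, ih]
        omega
      · rw [if_neg hx]
        rw [Bool.not_eq_true] at hx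
        simp only [hx, Bool.false_and, Bool.false_eq_true, List.length_cons,
          List.length_nil, false_iff]
        omega

lemma drop_all_iff {α : Type} (p : α → Bool) (l : List α) (k : Nat) :
    (l.drop k).all p = true ↔ l.length - k ≤ (l.reverse.takeWhile p).length := by
  have hrev : (l.drop k).all p = (l.reverse.take (l.length - k)).all p := by
    rw [← List.reverse_drop, List.all_reverse]
  rw [hrev, take_all_iff]
  simp only [List.length_reverse]
  omega

lemma index?_map_mem (A : List String) (mid : List String) :
    PySem.List.index? (mid.map (fun x => decide (x ∈ A))) false =
      if mid.all (fun x => decide (x ∈ A)) then none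
      else some ((mid.takeWhile (fun x => decide (x ∈ A))).length) := by
  induction mid with
  | nil => simp
  | cons x xs ih =>
    by_cases hx : x ∈ A
    · simp only [List.map_cons, List.all_cons, List.takeWhile_cons]
      rw [PySem.List.index?_cons_of_ne _ (by simp [hx]), ih]
      by_cases hall : xs.all (fun x => decide (x ∈ A))
      · simp [hx, hall]
      · simp [hx, hall]
    · simp only [List.map_cons, List.all_cons, List.takeWhile_cons]
      rw [show decide (x ∈ A) = false by simp [hx], PySem.List.index?_cons_self]
      simp

lemma body_eq (A B : List String) (mid : List String) :
    (if mid.isEmpty then true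
     else
       let inA := mid.map (fun x => decide (x ∈ A))
       let inB := mid.map (fun x => decide (x ∈ B))
       if ¬ (false ∈ inA) then true
       else
         match PySem.List.index? inA false with
         | none => false
         | some aCount =>
           if ¬ ((PySem.List.slice inB (some (aCount : Int)) none).all (fun b => b)) then false
           else decide ((aCount : Int) ≥ (inA.length : Int) - (aCount : Int))) =
    (let n := mid.length
     let t := count_b_suffix B mid.reverse
     let need := max ((n + 1) / 2) (n - t)
     (mid.take need).all (fun x => decide (x ∈ A))) := by
  set n := mid.length with hn
  set p := (mid.takeWhile (fun x => decide (x ∈ A))).length with hp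
  set t := (mid.reverse.takeWhile (fun x => decide (x ∈ B))).length with ht
  have hct : count_b_suffix B mid.reverse = t := count_b_suffix_eq B mid.reverse
  have hple : p ≤ n := (List.takeWhile_prefix _).length_le
  have htake : ∀ k : Nat, (mid.take k).all (fun x => decide (x ∈ A)) = true ↔ min k n ≤ p :=
    fun k => take_all_iff _ mid k
  simp only [hct]
  by_cases hall : mid.all (fun x => decide (x ∈ A))
  · have hpn : p = n := by
      have : mid.takeWhile (fun x => decide (x ∈ A)) = mid := by
        rw [List.takeWhile_eq_self_iff]
        intro x hx
        exact (List.all_eq_true.mp hall) x hx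
      rw [hp, this]
    have hB : (mid.take (max ((n + 1) / 2) (n - t))).all (fun x => decide (x ∈ A)) = true := by
      rw [htake]; omega
    rw [hB]
    by_cases hemp : mid.isEmpty
    · simp [hemp]
    · have hnf : ¬ (false ∈ mid.map (fun x => decide (x ∈ A))) := by
        simp only [List.mem_map]
        rintro ⟨x, hx, hfx⟩
        have := (List.all_eq_true.mp hall) x hx
        simp [this] at hfx
      simp [hemp, hnf]
  · have hne : mid ≠ [] := by rintro rfl; simp at hall
    have hplt : p < n := by
      rcases lt_or_eq_of_le hple with h | h
      · exact h
      · exfalso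
        have heq : mid.takeWhile (fun x => decide (x ∈ A)) = mid :=
          (List.takeWhile_prefix _).eq_of_length h
        apply hall
        rw [List.all_eq_true]
        intro x hx
        exact List.takeWhile_eq_self_iff.mp heq x hx
    have hf : false ∈ mid.map (fun x => decide (x ∈ A)) := by
      rw [List.all_eq_true] at hall
      push Not at hall
      obtain ⟨x, hx, hpx⟩ := hall
      simp only [Bool.not_eq_true, decide_eq_false_iff_not] at hpx
      exact List.mem_map.mpr ⟨x, hx, by simp [hpx]⟩
    have hdropiff : (mid.drop p).all (fun x => decide (x ∈ B)) = true ↔ n - p ≤ t :=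
      drop_all_iff _ mid p
    simp only [index?_map_mem, if_neg hall, List.isEmpty_iff, if_neg hne,
      if_neg (not_not_intro hf), PySem.List.slice_from_natCast, ← List.map_drop,
      List.all_map, Function.comp_def, List.length_map, ← hp, ← hn]
    by_cases hB : (mid.drop p).all (fun x => decide (x ∈ B)) = true
    · have hnt : n - t ≤ p := by have := hdropiff.mp hB; omega
      simp only [hB, not_true, if_false]
      by_cases h2 : 2 * p ≥ n
      · have : (mid.take (max ((n + 1) / 2) (n - t))).all (fun x => decide (x ∈ A)) = true := by
          rw [htake]; omega
        rw [this, decide_eq_true_eq]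
        omega
      · have : ¬ ((mid.take (max ((n + 1) / 2) (n - t))).all (fun x => decide (x ∈ A)) = true) := by
          rw [htake]; omega
        rw [Bool.not_eq_true] at this
        rw [this, decide_eq_false_iff_not]
        omega
    · have hnt : ¬ (n - t ≤ p) := by
        intro h; exact hB (hdropiff.mpr (by omega))
      have : ¬ ((mid.take (max ((n + 1) / 2) (n - t))).all (fun x => decide (x ∈ A)) = true) := by
        rw [htake]; omega
      rw [Bool.not_eq_true] at this
      simp [hB, this]

-- ===== VERDICT (by name: the statement is the Claim_ definition above) =====
theorem is_string_good_spec : Claim_equal_is_string_good := by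
  intro A B s _hdom hpre
  unfold Spec_is_string_good
  obtain ⟨hne, hor⟩ := hpre
  have hn1 : 1 ≤ s.toList.length := List.length_pos_of_ne_nil hne
  by_cases h9 : 9 ≤ s.toList.length
  · have hlen : 2 ≤ (split_string s).length := by rw [length_split_string]; omega
    have hssne : split_string s ≠ [] := by
      intro h; rw [h] at hlen; simp at hlen
    have h0 : 0 < (split_string s).length := by omega
    have h1 : 1 < (split_string s).length := by omega
    have e1 : PySem.List.pyGet? (split_string s) (-1)
        = some ((split_string s).getLast hssne) := by
      rw [PySem.List.pyGet?_neg_one, List.getLast?_eq_some_getLast]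
    have e2 : PySem.List.pyGet? (split_string s) 0 = some ((split_string s)[0]) := by
      rw [PySem.List.pyGet?_zero]; exact List.getElem?_eq_getElem h0
    have e3 : PySem.List.pyGet? (split_string s) 1 = some ((split_string s)[1]) := by
      have := PySem.List.pyGet?_ofNat (split_string s) 1 h1
      simpa using this
    have e4 : PySem.List.pyGetD (split_string s) (-1) ""
        = (split_string s).getLast hssne := PySem.List.pyGetD_neg_one _ _ hssne
    have e5 : PySem.List.pyGetD (split_string s) 0 "" = (split_string s)[0] := by
      have := PySem.List.pyGetD_eq_getElem (split_string s) (i := 0) ""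
        (by norm_num) (by exact_mod_cast h0)
      simpa using this
    have e6 : PySem.List.pyGetD (split_string s) 1 "" = (split_string s)[1] := by
      have := PySem.List.pyGetD_eq_getElem (split_string s) (i := 1) ""
        (by norm_num) (by exact_mod_cast h1)
      simpa using this
    unfold is_string_good is_string_good_alt
    simp only [e1, e2, e3, e4, e5, e6, if_neg (show ¬ (split_string s).length < 2 by omega)]
    by_cases hb : (split_string s).getLast hssne ∈ B
    · by_cases ha0 : (split_string s)[0] ∈ A
      · by_cases ha1 : (split_string s)[1] ∈ A
        · rw [if_neg (not_not_intro ha1), if_neg (not_not_intro ha0),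
            if_neg (not_not_intro hb),
            if_neg (show ¬ (¬ ((split_string s).getLast hssne ∈ B) ∨
              ¬ ((split_string s)[0] ∈ A) ∨ ¬ ((split_string s)[1] ∈ A)) by
                simp [hb, ha0, ha1])]
          exact body_eq A B (PySem.List.slice (split_string s) (some 2) (some (-1)))
        · simp [hb, ha0, ha1]
      · simp [hb, ha0]
    · simp [hb]
  · have hss1 : split_string s = [s] := split_string_short s hne (by omega)
    have hor' : ¬ s ∈ B ∨ ¬ s ∈ A := by
      rcases hor with h | h | h
      · omega
      · exact Or.inl h
      · exact Or.inr h
    unfold is_string_good is_string_good_alt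
    rw [hss1]
    rcases hor' with h | h
    · simp [PySem.List.pyGet?_neg_one, h]
    · simp [PySem.List.pyGet?_neg_one, h]
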